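-- pv_equiv track=rewrite | github.com/AlexeyBazanov/algorithms | sprint_4/contest.py | max_draw_sequence
-- ===== SOURCE A (Python) =====
-- def max_draw_sequence(contest_result):
--     score = [0, 0]
--     round_num = 1
--     diffs = {0: [0]}
--
--     for i in contest_result:
--         score[i] += 1
--
--         diff = score[0] - score[1]
--
--         if diff in diffs:
--             diffs[diff].append(round_num)
--         else:
--             diffs[diff] = [round_num]
--
--         round_num += 1
--
--     max_diff = 0
--
--     for d in diffs:
--         diffs_len = len(diffs[d])
--
--         if not diffs_len > 1:
--             pass
--
--         cur_diff = diffs[d][diffs_len-1] - diffs[d][0]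
--
--         if cur_diff > max_diff:
--             max_diff = cur_diff
--
--     return max_diff
-- ===== SOURCE B (Python) =====
-- def max_draw_sequence(contest_result):
--     first = {0: 0}
--     diff = 0
--     best = 0
--     round_num = 1
--     for team in contest_result:
--         diff += (1, -1)[team]
--         if diff in first:
--             best = max(best, round_num - first[diff])
--         else:
--             first[diff] = round_num
--         round_num += 1
--     return best
-- ===== Notes on version B (the rewrite author's own statement) =====
-- stated objective: simpler
-- what changed: One pass with a dict of FIRST occurrence indices per score difference and a running maximum, instead of A's dict of all occurrence lists followed by a second pass over the dict.
import Mathlib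
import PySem

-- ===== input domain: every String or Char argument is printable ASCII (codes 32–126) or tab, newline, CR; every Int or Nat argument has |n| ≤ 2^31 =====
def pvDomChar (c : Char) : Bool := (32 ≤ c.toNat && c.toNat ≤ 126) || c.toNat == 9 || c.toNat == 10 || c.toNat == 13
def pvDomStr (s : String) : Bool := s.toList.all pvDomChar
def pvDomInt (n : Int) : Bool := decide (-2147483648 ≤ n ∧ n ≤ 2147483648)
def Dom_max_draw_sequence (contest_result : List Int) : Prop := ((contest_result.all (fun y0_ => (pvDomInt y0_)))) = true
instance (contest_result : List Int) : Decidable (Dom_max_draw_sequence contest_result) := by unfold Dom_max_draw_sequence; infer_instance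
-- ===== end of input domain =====

-- B replaces A's dict-of-all-occurrence-lists plus second max pass by a single pass keeping
-- only the first round index of each score difference and a running maximum (simpler, same O(n)).


-- ===== PORT A =====
-- score[i] += 1 is ported with pySetD/pyGetD (exact on Pre_, where i ∈ {0,1});
-- diffs[diff].append / diffs[diff] = [round_num] keep A's branch structure on the dict.
def max_draw_sequence (contest_result : List Int) : Int :=
  let st := contest_result.foldl
    (fun (st : List Int × Int × PySem.Dict Int (List Int)) i =>
      let score := PySem.List.pySetD st.1 i (PySem.List.pyGetD st.1 i 0 + 1)
      let diff := PySem.List.pyGetD score 0 0 - PySem.List.pyGetD score 1 0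
      let diffs :=
        if st.2.2.contains diff then st.2.2.modify diff [] (· ++ [st.2.1])
        else st.2.2.insert diff [st.2.1]
      (score, st.2.1 + 1, diffs))
    ([0, 0], 1, PySem.Dict.ofList [(0, [0])])
  st.2.2.keys.foldl
    (fun max_diff d =>
      let l := st.2.2.getD d []
      let diffs_len : Int := (l.length : Int)
      let cur_diff := PySem.List.pyGetD l (diffs_len - 1) 0 - PySem.List.pyGetD l 0 0
      if cur_diff > max_diff then cur_diff else max_diff)
    0

-- ===== PORT B =====
-- the delta-table lookup indexed by team is ported with pyGetD (exact on Pre_);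
-- first[diff] is looked up only under 'diff in first'; ported as getD (exact there).
def max_draw_sequence_alt (contest_result : List Int) : Int :=
  let st := contest_result.foldl
    (fun (st : Int × Int × Int × PySem.Dict Int Int) i =>
      let diff := st.1 + PySem.List.pyGetD [1, -1] i 0
      let fs := st.2.2.2
      if fs.contains diff then (diff, max st.2.1 (st.2.2.1 - fs.getD diff 0), st.2.2.1 + 1, fs)
      else (diff, st.2.1, st.2.2.1 + 1, fs.insert diff st.2.2.1))
    (0, 0, 1, PySem.Dict.ofList [(0, 0)])
  st.2.1

-- ===== PRECONDITION & SPEC =====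
-- Exactly the inputs on which A returns: on any element outside -2..1 both A's score indexing
-- and B's delta-table indexing raise IndexError (a length-2 sequence accepts indices -2..1).
def Pre_max_draw_sequence (contest_result : List Int) : Prop :=
  ∀ x ∈ contest_result, x = -2 ∨ x = -1 ∨ x = 0 ∨ x = 1
instance (contest_result : List Int) : Decidable (Pre_max_draw_sequence contest_result) := by
  unfold Pre_max_draw_sequence; infer_instance
def pvWitness_max_draw_sequence : List Int := [0, 1, 1, 0, 1]

def Spec_max_draw_sequence (contest_result : List Int) (out : Int) : Prop :=
  out = max_draw_sequence_alt contest_result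
instance (contest_result : List Int) (out : Int) : Decidable (Spec_max_draw_sequence contest_result out) := by
  unfold Spec_max_draw_sequence; infer_instance

-- ===== CLAIM (what is proved, stated in full; the proofs are below) =====
def Claim_equal_max_draw_sequence : Prop := ∀ (contest_result : List Int), Dom_max_draw_sequence contest_result → Pre_max_draw_sequence contest_result → Spec_max_draw_sequence contest_result (max_draw_sequence contest_result)

-- ===== LEMMAS AND PROOFS =====

def pvFA (st : List Int × Int × PySem.Dict Int (List Int)) (i : Int) :
    List Int × Int × PySem.Dict Int (List Int) :=
  let score := PySem.List.pySetD st.1 i (PySem.List.pyGetD st.1 i 0 + 1)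
  let diff := PySem.List.pyGetD score 0 0 - PySem.List.pyGetD score 1 0
  let diffs :=
    if st.2.2.contains diff then st.2.2.modify diff [] (· ++ [st.2.1])
    else st.2.2.insert diff [st.2.1]
  (score, st.2.1 + 1, diffs)

def pvFB (st : Int × Int × Int × PySem.Dict Int Int) (i : Int) :
    Int × Int × Int × PySem.Dict Int Int :=
  let diff := st.1 + PySem.List.pyGetD [1, -1] i 0
  let fs := st.2.2.2
  if fs.contains diff then (diff, max st.2.1 (st.2.2.1 - fs.getD diff 0), st.2.2.1 + 1, fs)
  else (diff, st.2.1, st.2.2.1 + 1, fs.insert diff st.2.2.1)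

def pvG (p : Int × List Int) : Int := p.2.getLast?.getD 0 - p.2.headI
def pvF (m : Int) (p : Int × List Int) : Int := max m (pvG p)

def pvInv (a : List Int × Int × PySem.Dict Int (List Int))
    (b : Int × Int × Int × PySem.Dict Int Int) : Prop :=
  (∃ s0 s1 : Int, a.1 = [s0, s1] ∧ b.1 = s0 - s1) ∧
  b.2.2.1 = a.2.1 ∧
  a.2.2.keys.Nodup ∧
  b.2.2.2.items = a.2.2.items.map (fun p => (p.1, p.2.headI)) ∧
  (∀ p ∈ a.2.2.items, p.2 ≠ [] ∧ p.2.getLast?.getD 0 < a.2.1) ∧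
  b.2.1 = a.2.2.items.foldl pvF 0 ∧ 0 ≤ b.2.1

lemma pv_keys_eq_map_fst (d : PySem.Dict Int (List Int)) : d.keys = d.items.map Prod.fst := rfl
lemma pv_keys_eq_map_fst' (d : PySem.Dict Int Int) : d.keys = d.items.map Prod.fst := rfl

lemma pv_foldl_max_pull (L : List (Int × List Int)) (a b : Int) :
    L.foldl pvF (max a b) = max a (L.foldl pvF b) := by
  induction L generalizing b with
  | nil => rfl
  | cons p t ih =>
    simp only [List.foldl_cons, pvF, max_assoc]
    exact ih (max b (pvG p))

lemma pv_foldl_split (L1 L2 : List (Int × List Int)) (p : Int × List Int) :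
    (L1 ++ p :: L2).foldl pvF 0 = max (pvG p) (L2.foldl pvF (L1.foldl pvF 0)) := by
  rw [List.foldl_append, List.foldl_cons]
  show L2.foldl pvF (max (L1.foldl pvF 0) (pvG p)) = _
  rw [max_comm, pv_foldl_max_pull]

lemma pv_split_of_mem (items : List (Int × List Int)) (d' : Int) (v : List Int)
    (h : (d', v) ∈ items) (hn : (items.map Prod.fst).Nodup) :
    ∃ L1 L2, items = L1 ++ (d', v) :: L2 ∧ d' ∉ L1.map Prod.fst ∧ d' ∉ L2.map Prod.fst := by
  induction items with
  | nil => simp at h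
  | cons q t ih =>
    simp only [List.map_cons, List.nodup_cons] at hn
    rcases List.mem_cons.mp h with rfl | hmem
    · exact ⟨[], t, rfl, by simp, by simpa using hn.1⟩
    · obtain ⟨L1, L2, rfl, h1, h2⟩ := ih hmem hn.2
      refine ⟨q :: L1, L2, rfl, ?_, h2⟩
      have hd : d' ∈ (L1 ++ (d', v) :: L2).map Prod.fst := by simp
      simp only [List.map_cons, List.mem_cons]
      rintro (rfl | hx)
      · exact hn.1 hd
      · exact h1 hx

lemma pv_map_if_id (L : List (Int × List Int)) (d' : Int) (x : Int × List Int)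
    (h : d' ∉ L.map Prod.fst) :
    L.map (fun p => if p.1 == d' then x else p) = L := by
  induction L with
  | nil => rfl
  | cons q t ih => simp_all [beq_iff_eq]; intro hq; simp_all

lemma pv_modify_eq_insert (d : PySem.Dict Int (List Int)) (k : Int) (f : List Int → List Int) :
    d.modify k [] f = d.insert k (f (d.getD k [])) := rfl

lemma pv_headI_append (v : List Int) (w : Int) (h : v ≠ []) : (v ++ [w]).headI = v.headI := by
  cases v <;> simp_all

lemma pv_fs_keys (ds : PySem.Dict Int (List Int)) (fs : PySem.Dict Int Int)
    (hit : fs.items = ds.items.map (fun p => (p.1, p.2.headI))) : fs.keys = ds.keys := by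
  rw [pv_keys_eq_map_fst, pv_keys_eq_map_fst', hit, List.map_map]; rfl

lemma pv_fs_contains (ds : PySem.Dict Int (List Int)) (fs : PySem.Dict Int Int)
    (hit : fs.items = ds.items.map (fun p => (p.1, p.2.headI))) (k : Int) :
    fs.contains k = ds.contains k := by
  rw [PySem.Dict.contains_eq_decide_mem_keys, PySem.Dict.contains_eq_decide_mem_keys,
    pv_fs_keys ds fs hit]

theorem pv_core (s0' s1' rn best : Int) (ds : PySem.Dict Int (List Int))
    (fs : PySem.Dict Int Int) (d' : Int) (hd' : d' = s0' - s1')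
    (hnd : ds.keys.Nodup)
    (hit : fs.items = ds.items.map (fun p => (p.1, p.2.headI)))
    (hent : ∀ p ∈ ds.items, p.2 ≠ [] ∧ p.2.getLast?.getD 0 < rn)
    (hbest : best = ds.items.foldl pvF 0) (hbnn : 0 ≤ best) :
    pvInv ([s0', s1'], rn + 1,
        if ds.contains d' then ds.modify d' [] (· ++ [rn]) else ds.insert d' [rn])
      (if fs.contains d' then (d', max best (rn - fs.getD d' 0), rn + 1, fs)
       else (d', best, rn + 1, fs.insert d' rn)) := by
  have hcfs := pv_fs_contains ds fs hit d'
  have hndf : (ds.items.map Prod.fst).Nodup := by rwa [pv_keys_eq_map_fst] at hnd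
  cases hc : ds.contains d' with
  | true =>
    rw [hcfs, hc]
    simp only [if_true]
    -- the existing value v at key d'
    have hsome : (ds.get? d').isSome := by rw [← PySem.Dict.contains_eq_isSome_get?, hc]
    obtain ⟨v, hv⟩ := Option.isSome_iff_exists.mp hsome
    have hmem : (d', v) ∈ ds.items := PySem.Dict.mem_items_of_get?_eq_some _ hv
    have hgetD : ds.getD d' [] = v := PySem.Dict.getD_of_get?_eq_some _ _ hv
    obtain ⟨hvne', hvlt'⟩ := hent _ hmem
    have hvne : v ≠ [] := hvne'
    have hvlt : v.getLast?.getD 0 < rn := hvlt'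
    obtain ⟨L1, L2, hsplit, hL1, hL2⟩ := pv_split_of_mem ds.items d' v hmem hndf
    rw [pv_modify_eq_insert, hgetD]
    have hitems' : (ds.insert d' (v ++ [rn])).items = L1 ++ (d', v ++ [rn]) :: L2 := by
      rw [PySem.Dict.items_insert_of_contains _ _ hc, hsplit, List.map_append, List.map_cons,
        pv_map_if_id L1 d' _ hL1, pv_map_if_id L2 d' _ hL2]
      simp
    have hfsget : fs.getD d' 0 = v.headI :=
      PySem.Dict.getD_of_mem_items _ (by rw [hit]; exact List.mem_map_of_mem hmem)
        (by rw [pv_fs_keys ds fs hit]; exact hnd) 0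
    refine ⟨⟨s0', s1', rfl, hd'⟩, rfl, ?_, ?_, ?_, ?_, ?_⟩
    · simpa [PySem.Dict.keys_insert_of_contains _ _ hc] using hnd
    · simp only [hit, hitems', hsplit, List.map_append, List.map_cons,
        pv_headI_append v rn hvne]
    · intro p hp
      rw [hitems'] at hp
      rcases List.mem_append.mp hp with hp1 | hp2
      · have := hent p (by rw [hsplit]; exact List.mem_append.mpr (Or.inl hp1))
        exact ⟨this.1, by dsimp only; omega⟩
      · rcases List.mem_cons.mp hp2 with rfl | hp3
        · refine ⟨by simp, ?_⟩
          dsimp only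
          simp only [List.getLast?_concat, Option.getD_some]
          omega
        · have := hent p (by rw [hsplit]; simp [hp3])
          exact ⟨this.1, by dsimp only; omega⟩
    · show max best (rn - fs.getD d' 0) = _
      rw [hitems', pv_foldl_split, hbest, hsplit, pv_foldl_split, hfsget]
      have h1 : pvG (d', v ++ [rn]) = rn - v.headI := by
        show (v ++ [rn]).getLast?.getD 0 - (v ++ [rn]).headI = rn - v.headI
        rw [List.getLast?_concat, pv_headI_append v rn hvne]
        rfl
      have h2 : pvG (d', v) ≤ rn - v.headI := by
        show v.getLast?.getD 0 - v.headI ≤ rn - v.headI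
        omega
      rw [h1, max_assoc, max_comm (L2.foldl pvF (L1.foldl pvF 0)) (rn - v.headI),
        ← max_assoc, max_eq_right h2]
    · show 0 ≤ max best (rn - fs.getD d' 0)
      exact le_trans hbnn (le_max_left _ _)
  | false =>
    rw [hcfs, hc]
    simp only [Bool.false_eq_true, if_false]
    have hnotmem : d' ∉ ds.keys := by
      rw [PySem.Dict.contains_eq_decide_mem_keys] at hc; simpa using hc
    have hitems' : (ds.insert d' [rn]).items = ds.items ++ [(d', [rn])] :=
      PySem.Dict.items_insert_of_not_contains _ _ hc
    have hcfs' : fs.contains d' = false := by rw [hcfs, hc]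
    have hfitems' : (fs.insert d' rn).items = fs.items ++ [(d', rn)] :=
      PySem.Dict.items_insert_of_not_contains _ _ hcfs'
    refine ⟨⟨s0', s1', rfl, hd'⟩, rfl, ?_, ?_, ?_, ?_, hbnn⟩
    · rw [PySem.Dict.keys_insert_of_not_contains _ _ hc]
      refine List.Nodup.append hnd (List.nodup_singleton d') ?_
      simpa [List.disjoint_singleton] using hnotmem
    · rw [hfitems', hitems', hit]; simp
    · intro p hp
      rw [hitems'] at hp
      rcases List.mem_append.mp hp with hp1 | hp2
      · have := hent p hp1
        exact ⟨this.1, by dsimp only; omega⟩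
      · simp only [List.mem_singleton] at hp2
        subst hp2
        refine ⟨by simp, ?_⟩
        dsimp only
        simp only [List.getLast?_singleton, Option.getD_some]
        omega
    · show best = _
      rw [hitems', List.foldl_append, ← hbest]
      simp only [List.foldl_cons, List.foldl_nil, pvF, pvG]
      simp [max_eq_left hbnn]

theorem pv_step (a : List Int × Int × PySem.Dict Int (List Int))
    (b : Int × Int × Int × PySem.Dict Int Int) (i : Int)
    (hi : i = -2 ∨ i = -1 ∨ i = 0 ∨ i = 1) (h : pvInv a b) : pvInv (pvFA a i) (pvFB b i) := by
  obtain ⟨score, rn0, ds⟩ := a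
  obtain ⟨diff, best, rn, fs⟩ := b
  obtain ⟨⟨s0, s1, hsc, hdiff⟩, hrn, hnd, hit, hent, hbest, hbnn⟩ := h
  simp only at hsc hdiff hrn hnd hit hent hbest hbnn
  subst hsc hdiff hrn
  rcases hi with rfl | rfl | rfl | rfl
  · have hA : pvFA ([s0, s1], rn, ds) (-2) =
        ([s0 + 1, s1], rn + 1,
          if ds.contains (s0 + 1 - s1) then ds.modify (s0 + 1 - s1) [] (· ++ [rn])
          else ds.insert (s0 + 1 - s1) [rn]) := rfl
    have hB : pvFB (s0 - s1, best, rn, fs) (-2) =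
        (if fs.contains (s0 - s1 + 1) then
          (s0 - s1 + 1, max best (rn - fs.getD (s0 - s1 + 1) 0), rn + 1, fs)
         else (s0 - s1 + 1, best, rn + 1, fs.insert (s0 - s1 + 1) rn)) := rfl
    have he : s0 - s1 + 1 = s0 + 1 - s1 := by ring
    rw [hA, hB, he]
    exact pv_core (s0 + 1) s1 rn best ds fs (s0 + 1 - s1) rfl hnd hit hent hbest hbnn
  · have hA : pvFA ([s0, s1], rn, ds) (-1) =
        ([s0, s1 + 1], rn + 1,
          if ds.contains (s0 - (s1 + 1)) then ds.modify (s0 - (s1 + 1)) [] (· ++ [rn])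
          else ds.insert (s0 - (s1 + 1)) [rn]) := rfl
    have hB : pvFB (s0 - s1, best, rn, fs) (-1) =
        (if fs.contains (s0 - s1 + -1) then
          (s0 - s1 + -1, max best (rn - fs.getD (s0 - s1 + -1) 0), rn + 1, fs)
         else (s0 - s1 + -1, best, rn + 1, fs.insert (s0 - s1 + -1) rn)) := rfl
    have he : s0 - s1 + -1 = s0 - (s1 + 1) := by ring
    rw [hA, hB, he]
    exact pv_core s0 (s1 + 1) rn best ds fs (s0 - (s1 + 1)) rfl hnd hit hent hbest hbnn
  · have hA : pvFA ([s0, s1], rn, ds) 0 =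
        ([s0 + 1, s1], rn + 1,
          if ds.contains (s0 + 1 - s1) then ds.modify (s0 + 1 - s1) [] (· ++ [rn])
          else ds.insert (s0 + 1 - s1) [rn]) := rfl
    have hB : pvFB (s0 - s1, best, rn, fs) 0 =
        (if fs.contains (s0 - s1 + 1) then
          (s0 - s1 + 1, max best (rn - fs.getD (s0 - s1 + 1) 0), rn + 1, fs)
         else (s0 - s1 + 1, best, rn + 1, fs.insert (s0 - s1 + 1) rn)) := rfl
    have he : s0 - s1 + 1 = s0 + 1 - s1 := by ring
    rw [hA, hB, he]
    exact pv_core (s0 + 1) s1 rn best ds fs (s0 + 1 - s1) rfl hnd hit hent hbest hbnn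
  · have hA : pvFA ([s0, s1], rn, ds) 1 =
        ([s0, s1 + 1], rn + 1,
          if ds.contains (s0 - (s1 + 1)) then ds.modify (s0 - (s1 + 1)) [] (· ++ [rn])
          else ds.insert (s0 - (s1 + 1)) [rn]) := rfl
    have hB : pvFB (s0 - s1, best, rn, fs) 1 =
        (if fs.contains (s0 - s1 + -1) then
          (s0 - s1 + -1, max best (rn - fs.getD (s0 - s1 + -1) 0), rn + 1, fs)
         else (s0 - s1 + -1, best, rn + 1, fs.insert (s0 - s1 + -1) rn)) := rfl
    have he : s0 - s1 + -1 = s0 - (s1 + 1) := by ring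
    rw [hA, hB, he]
    exact pv_core s0 (s1 + 1) rn best ds fs (s0 - (s1 + 1)) rfl hnd hit hent hbest hbnn

lemma pv_init : pvInv ([0, 0], 1, PySem.Dict.ofList [((0:Int), [(0:Int)])])
    ((0:Int), (0:Int), (1:Int), PySem.Dict.ofList [((0:Int), (0:Int))]) := by
  refine ⟨⟨0, 0, rfl, rfl⟩, rfl, by decide, rfl, ?_, rfl, le_refl 0⟩
  intro p hp
  simp only [show (PySem.Dict.ofList [((0:Int), [(0:Int)])]).items = [(0, [0])] from rfl,
    List.mem_singleton] at hp
  subst hp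
  exact ⟨by simp, by decide⟩

lemma pv_fold (l : List Int) : ∀ a b, (∀ x ∈ l, x = -2 ∨ x = -1 ∨ x = 0 ∨ x = 1) → pvInv a b →
    pvInv (l.foldl pvFA a) (l.foldl pvFB b) := by
  induction l with
  | nil => intro a b _ h; exact h
  | cons x t ih =>
    intro a b hp h
    exact ih _ _ (fun y hy => hp y (List.mem_cons_of_mem x hy))
      (pv_step a b x (hp x List.mem_cons_self) h)

lemma pv_pyGetD_last (l : List Int) (h : l ≠ []) :
    PySem.List.pyGetD l ((l.length : Int) - 1) 0 = l.getLast?.getD 0 := by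
  have h1 : ((l.length : Int) - 1) = ((l.length - 1 : Nat) : Int) := by
    rcases l with _ | _ <;> simp_all
  rw [h1, PySem.List.pyGetD_natCast, List.getLast?_eq_getElem?, List.getD_eq_getElem?_getD]

lemma pv_pyGetD_head (l : List Int) (h : l ≠ []) : PySem.List.pyGetD l 0 0 = l.headI := by
  rcases l with _ | _ <;> simp_all [PySem.List.pyGetD_zero]

lemma pv_F_eq (m : Int) (p : Int × List Int) (h : p.2 ≠ []) :
    (if (PySem.List.pyGetD p.2 ((p.2.length : Int) - 1) 0 - PySem.List.pyGetD p.2 0 0) > m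
     then PySem.List.pyGetD p.2 ((p.2.length : Int) - 1) 0 - PySem.List.pyGetD p.2 0 0
     else m) = pvF m p := by
  rw [pv_pyGetD_last _ h, pv_pyGetD_head _ h]
  by_cases hgt : p.2.getLast?.getD 0 - p.2.headI > m
  · rw [if_pos hgt]; exact (max_eq_right (le_of_lt hgt)).symm
  · rw [if_neg hgt]; exact (max_eq_left (not_lt.mp hgt)).symm

lemma pv_foldl_F_eq (L : List (Int × List Int)) (hne : ∀ p ∈ L, p.2 ≠ []) : ∀ m : Int,
    L.foldl
      (fun m p =>
        if (PySem.List.pyGetD p.2 ((p.2.length : Int) - 1) 0 - PySem.List.pyGetD p.2 0 0) > m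
        then PySem.List.pyGetD p.2 ((p.2.length : Int) - 1) 0 - PySem.List.pyGetD p.2 0 0
        else m) m = L.foldl pvF m := by
  induction L with
  | nil => intro m; rfl
  | cons p t ih =>
    intro m
    rw [List.foldl_cons, List.foldl_cons, pv_F_eq m p (hne p List.mem_cons_self)]
    exact ih (fun q hq => hne q (List.mem_cons_of_mem p hq)) (pvF m p)

lemma pv_final (a : List Int × Int × PySem.Dict Int (List Int))
    (b : Int × Int × Int × PySem.Dict Int Int) (h : pvInv a b) :
    a.2.2.keys.foldl
      (fun max_diff d =>
        let l := a.2.2.getD d []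
        let diffs_len : Int := (l.length : Int)
        let cur_diff := PySem.List.pyGetD l (diffs_len - 1) 0 - PySem.List.pyGetD l 0 0
        if cur_diff > max_diff then cur_diff else max_diff) 0 = b.2.1 := by
  obtain ⟨-, -, hnd, -, hent, hbest, -⟩ := h
  rw [hbest]
  have hitems := PySem.Dict.items_eq_map_keys a.2.2 hnd []
  have h1 : a.2.2.keys.foldl
      (fun max_diff d =>
        let l := a.2.2.getD d []
        let diffs_len : Int := (l.length : Int)
        let cur_diff := PySem.List.pyGetD l (diffs_len - 1) 0 - PySem.List.pyGetD l 0 0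
        if cur_diff > max_diff then cur_diff else max_diff) 0 =
      a.2.2.items.foldl
        (fun m p =>
          if (PySem.List.pyGetD p.2 ((p.2.length : Int) - 1) 0 - PySem.List.pyGetD p.2 0 0) > m
          then PySem.List.pyGetD p.2 ((p.2.length : Int) - 1) 0 - PySem.List.pyGetD p.2 0 0
          else m) 0 := by
    rw [hitems, List.foldl_map]
  rw [h1, pv_foldl_F_eq _ (fun p hp => (hent p hp).1) 0]


-- ===== VERDICT (by name: the statement is the Claim_ definition above) =====
theorem max_draw_sequence_spec : Claim_equal_max_draw_sequence := by
  intro l _ hpre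
  unfold Spec_max_draw_sequence max_draw_sequence max_draw_sequence_alt
  exact pv_final _ _ (pv_fold l _ _ hpre pv_init)
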